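-- pv_equiv track=rewrite | github.com/mergen-han/dst-turkce-yama | pipeline/validate_po.py | check_escapes
-- ===== SOURCE A (Python) =====
-- def check_escapes(s: str) -> str | None:
--     """Backslash escape ihlali var mı? Sadece \\n, \\r, \\" geçerli."""
--     i = 0
--     while i < len(s):
--         if s[i] == "\\":
--             if i + 1 >= len(s):
--                 return f"dangling backslash at end: {s[-20:]!r}"
--             nxt = s[i + 1]
--             if nxt not in ('n', 'r', '"', '\\'):
--                 return f"invalid escape \\{nxt} in: {s!r}"
--             i += 2
--             continue
--         i += 1
--     return None
-- ===== SOURCE B (Python) =====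
-- def check_escapes(s: str) -> str | None:
--     """Backslash escape ihlali var mı? Sadece \\n, \\r, \\" geçerli."""
--     # Tokenize on backslashes: segment i (i >= 1) follows the i-th backslash.
--     # A nonempty segment must start with a valid escape letter; an empty segment
--     # means "\\" (it consumed the next backslash) unless it is the last one,
--     # in which case the string ends in a dangling backslash.
--     parts = s.split("\\")
--     i = 1
--     while i < len(parts):
--         seg = parts[i]
--         if seg:
--             if seg[0] not in ('n', 'r', '"'):
--                 return f"invalid escape \\{seg[0]} in: {s!r}"
--             i += 1
--         else:
--             if i == len(parts) - 1:
--                 return f"dangling backslash at end: {s[-20:]!r}"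
--             i += 2
--     return None
-- ===== Notes on version B (the rewrite author's own statement) =====
-- stated objective: faster
-- what changed: Instead of scanning character by character with an index that skips by 2, B tokenizes the string once with str.split on the backslash and judges each resulting segment by its first character (an empty segment is an escaped backslash that consumes the next segment; a trailing empty one is a dangling backslash).
import Mathlib
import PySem

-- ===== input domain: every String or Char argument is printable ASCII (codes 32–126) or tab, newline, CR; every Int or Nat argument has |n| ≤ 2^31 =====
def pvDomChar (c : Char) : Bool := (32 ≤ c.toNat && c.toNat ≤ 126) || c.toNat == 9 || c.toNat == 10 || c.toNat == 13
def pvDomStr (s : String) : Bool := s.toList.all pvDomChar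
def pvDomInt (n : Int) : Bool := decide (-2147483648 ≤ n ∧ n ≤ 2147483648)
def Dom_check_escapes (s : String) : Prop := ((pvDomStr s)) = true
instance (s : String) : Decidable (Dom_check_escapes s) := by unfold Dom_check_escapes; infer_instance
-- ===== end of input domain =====

-- B replaces A's per-character index scan by a tokenization: split the string on
-- backslashes once and judge each segment by its first character (objective: alternative).

-- Shared helper: Python's repr() of a str (f-string `!r`), exact on the printable-ASCII
-- (plus tab/newline/CR) domain Dom_check_escapes: chooses single quotes unless the string
-- contains ' and no ", and escapes backslash, tab, newline, CR and the chosen quote.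
def pyReprChar (q : Char) (c : Char) : List Char :=
  if c = '\\' then ['\\', '\\']
  else if c = '\t' then ['\\', 't']
  else if c = '\n' then ['\\', 'n']
  else if c = '\r' then ['\\', 'r']
  else if c = q then ['\\', q]
  else [c]

def pyRepr (s : String) : String :=
  let l := s.toList
  let q : Char := if l.contains '\'' ∧ ¬ l.contains '"' then '"' else '\''
  String.ofList (q :: (l.flatMap (pyReprChar q)) ++ [q])

def msgDangling (s : String) : String :=
  "dangling backslash at end: " ++ pyRepr (String.ofList (PySem.List.slice s.toList (some (-20)) none))

def msgInvalid (s : String) (n : Char) : String :=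
  "invalid escape \\" ++ String.ofList [n] ++ " in: " ++ pyRepr s

-- ===== PORT A =====
-- A's while loop over index i (i += 2 after a valid escape), as recursion on the suffix at i.
def goA (s : String) : List Char → Option String
  | [] => none
  | c :: rest =>
    if c = '\\' then
      match rest with
      | [] => some (msgDangling s)
      | n :: rest' =>
        if n = 'n' ∨ n = 'r' ∨ n = '"' ∨ n = '\\' then goA s rest'
        else some (msgInvalid s n)
    else goA s rest

def check_escapes (s : String) : Option String := goA s s.toList

-- ===== PORT B =====
-- B's while loop over parts = s.split('\\') starting at index 1 (i += 2 past an empty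
-- segment, which stands for an escaped backslash); s.split('\\') ports to List.splitOn.
def goB (s : String) : List (List Char) → Option String
  | [] => none
  | seg :: rest =>
    match seg with
    | c :: _ =>
      if c = 'n' ∨ c = 'r' ∨ c = '"' then goB s rest
      else some (msgInvalid s c)
    | [] =>
      match rest with
      | [] => some (msgDangling s)
      | _ :: rest' => goB s rest'

def check_escapes_alt (s : String) : Option String :=
  goB s ((s.toList.splitOn '\\').drop 1)

-- ===== PRECONDITION & SPEC =====
def Spec_check_escapes (s : String) (out : Option String) : Prop := out = check_escapes_alt s
instance (s : String) (out : Option String) : Decidable (Spec_check_escapes s out) := by unfold Spec_check_escapes; infer_instance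

-- ===== CLAIM (what is proved, stated in full; the proofs are below) =====
def Claim_equal_check_escapes : Prop := ∀ (s : String), Dom_check_escapes s → Spec_check_escapes s (check_escapes s)

-- ===== LEMMAS AND PROOFS =====
theorem goA_eq_goB (s : String) :
    ∀ (n : ℕ) (l : List Char), l.length ≤ n →
      goA s l = goB s ((List.splitOnP (· == '\\') l).drop 1) := by
  intro n
  induction n with
  | zero =>
    intro l h
    cases l with
    | nil => simp [goA, goB]
    | cons c rest => simp at h
  | succ n ih =>
    intro l h
    cases l with
    | nil => simp [goA, goB]
    | cons c t =>
      by_cases hc : c = '\\'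
      · subst hc
        cases t with
        | nil => simp [goA, goB]
        | cons m t' =>
          have ht' : t'.length ≤ n := by simp at h; omega
          obtain ⟨q, tl, hq⟩ := List.exists_cons_of_ne_nil
            (List.splitOnP_ne_nil (· == '\\') t')
          have htl : (List.splitOnP (· == '\\') t').drop 1 = tl := by rw [hq]; rfl
          by_cases hm : m = '\\'
          · subst hm
            have : goA s t' = goB s tl := htl ▸ ih t' ht'
            simp [goA, goB, List.splitOnP_cons, hq, this]
          · by_cases hv : m = 'n' ∨ m = 'r' ∨ m = '"'
            · have : goA s t' = goB s tl := htl ▸ ih t' ht'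
              simp [goA, goB, List.splitOnP_cons, hm, hq, hv, this]
            · simp [goA, goB, List.splitOnP_cons, hm, hq, hv]
      · have ht : t.length ≤ n := by simp at h; omega
        obtain ⟨q, tl, hq⟩ := List.exists_cons_of_ne_nil
          (List.splitOnP_ne_nil (· == '\\') t)
        have htl : (List.splitOnP (· == '\\') t).drop 1 = tl := by rw [hq]; rfl
        have : goA s t = goB s tl := htl ▸ ih t ht
        rw [goA.eq_def]
        simp only [hc, if_false]
        simpa [List.splitOnP_cons, hc, hq] using this

-- ===== VERDICT (by name: the statement is the Claim_ definition above) =====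
theorem check_escapes_spec : Claim_equal_check_escapes := by
  intro s _
  unfold Spec_check_escapes check_escapes check_escapes_alt
  simp only [List.splitOn]
  exact goA_eq_goB s s.toList.length s.toList le_rfl
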